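-- pv_equiv track=rewrite | github.com/Carl-Chinatomby/Algorithms-and-Data-Structures | programing_problems/slice_sort.py | solution
-- ===== SOURCE A (Python) =====
-- def solution(A):
--     slice_cnt = 0
--     start_index = 0
--     end_index = 0
--     done = False
--
--     while not done:
--         # We are grouping our slices by stopping at the smallest number below our start point
--         for i, val in enumerate(A[start_index:]):
--             if val < A[start_index]:
--                 end_index = i + start_index
--
--         slice_cnt += 1
--         start_index = end_index = end_index + 1 # start a new slice range
--
--         if start_index > len(A) - 1: # we are out of bounds and the last slice covered this value
--             done = True
--         elif start_index == len(A) - 1: # we are at the end and the last slice is single digit sort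
--             slice_cnt += 1
--             done = True
--
--     return slice_cnt
-- ===== SOURCE B (Python) =====
-- def solution(A):
--     n = len(A)
--     # Monotonic stack: indices whose value is strictly below every later value.
--     # After the pass, cand is increasing both in index and in value.
--     cand = []
--     for j in range(n):
--         while cand and A[cand[-1]] >= A[j]:
--             cand.pop()
--         cand.append(j)
--     cnt = 0
--     s = 0
--     while True:
--         # binary search: first position k in cand with A[cand[k]] >= A[s]
--         lo, hi = 0, len(cand)
--         while lo < hi:
--             mid = (lo + hi) // 2
--             if A[cand[mid]] < A[s]:
--                 lo = mid + 1
--             else: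
--                 hi = mid
--         # the predecessor, when it exists and lies in the suffix, is the last
--         # index with a value below A[s]; otherwise the slice is just [s]
--         e = cand[lo - 1] if lo > 0 and cand[lo - 1] >= s else s
--         cnt += 1
--         s = e + 1
--         if s > n - 1:
--             return cnt
--         if s == n - 1:
--             return cnt + 1
-- ===== Notes on version B (the rewrite author's own statement) =====
-- stated objective: faster
-- what changed: A rescans the whole suffix for every slice (O(n^2) on increasing input); B precomputes with one monotonic-stack pass the indices that are below every later value (increasing in index and value) and finds each slice end by binary search on that stack, then runs the same jump loop once.
import Mathlib
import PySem

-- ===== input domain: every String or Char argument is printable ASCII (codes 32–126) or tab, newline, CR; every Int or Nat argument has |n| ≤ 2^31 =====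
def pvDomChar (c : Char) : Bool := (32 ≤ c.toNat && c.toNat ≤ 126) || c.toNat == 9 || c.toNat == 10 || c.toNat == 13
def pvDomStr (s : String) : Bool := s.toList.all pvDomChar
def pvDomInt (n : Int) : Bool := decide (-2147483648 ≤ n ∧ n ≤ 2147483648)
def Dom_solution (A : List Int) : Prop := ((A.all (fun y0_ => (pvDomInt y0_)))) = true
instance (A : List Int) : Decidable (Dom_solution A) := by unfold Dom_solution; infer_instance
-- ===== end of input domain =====

-- B replaces A's per-slice suffix rescan by a precomputed monotonic stack plus binary search
-- (measured asymptotically faster); return values agree on every input, both functions are total.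


-- ===== PORT A =====
-- Python's indices (start_index, end_index) start at 0 and only ever grow, so they are
-- transcribed as Nat; slice_cnt stays Int.  The inner 'for i, val in enumerate(A[start_index:])'
-- keeps the last i+start_index whose value is below A[start_index]; A[start_index] is only
-- evaluated when the loop body runs, i.e. when s < len A, where A.getD s 0 is exact.
def solInner (A : List Int) (s : Nat) : Nat :=
  (PySem.List.enumerate (A.drop s)).foldl
    (fun e iv => if iv.2 < A.getD s 0 then iv.1.toNat + s else e) s

-- the running end_index never drops below start_index (used for termination of solLoop)
theorem solInner_ge (A : List Int) (s : Nat) : s ≤ solInner A s := by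
  unfold solInner
  generalize PySem.List.enumerate (A.drop s) = l
  suffices h : ∀ (l : List (Int × Int)) (e0 : Nat), s ≤ e0 →
      s ≤ l.foldl (fun e iv => if iv.2 < A.getD s 0 then iv.1.toNat + s else e) e0 from
    h l s le_rfl
  intro l
  induction l with
  | nil => intro e0 h; simpa using h
  | cons p t ih =>
    intro e0 h
    simp only [List.foldl_cons]
    apply ih
    split <;> omega

-- the while-loop; on entry end_index = start_index always holds, so only (cnt, s) is state
-- (end_index + 1 is written out as solInner A s + 1 instead of being let-bound)
def solLoop (A : List Int) (cnt : Int) (s : Nat) : Int :=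
  if ((solInner A s + 1 : Nat) : Int) > (A.length : Int) - 1 then cnt + 1
  else if ((solInner A s + 1 : Nat) : Int) = (A.length : Int) - 1 then cnt + 2
  else solLoop A (cnt + 1) (solInner A s + 1)
termination_by A.length - s
decreasing_by
  have h1 := solInner_ge A s
  rename_i h2 _
  simp only [not_lt] at h2
  omega

def solution (A : List Int) : Int := solLoop A 0 0

-- ===== PORT B =====
-- 'while cand and A[cand[-1]] >= A[j]: cand.pop()'; the stack is kept top-first
-- (push/pop at the head), the final reverse below restores Python's bottom-first order.
def popGE (A : List Int) (x : Int) : List Nat → List Nat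
  | [] => []
  | t :: rest => if x ≤ A.getD t 0 then popGE A x rest else t :: rest

-- one pass over range(n): indices whose value is below every later value,
-- increasing in index and in value
def altCand (A : List Int) : List Nat :=
  ((List.range A.length).foldl (fun st j => j :: popGE A (A.getD j 0) st) []).reverse

-- 'lo, hi = 0, len(cand)' binary search: first k with A[cand[k]] >= x
def altBS (A : List Int) (cand : List Nat) (x : Int) (lo hi : Nat) : Nat :=
  if _h : lo < hi then
    if A.getD (cand.getD ((lo + hi) / 2) 0) 0 < x then altBS A cand x ((lo + hi) / 2 + 1) hi
    else altBS A cand x lo ((lo + hi) / 2)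
  else lo
termination_by hi - lo
decreasing_by all_goals omega

-- 'e = cand[lo - 1] if lo > 0 and cand[lo - 1] >= s else s'
def altQuery (A : List Int) (cand : List Nat) (s : Nat) : Nat :=
  let lo := altBS A cand (A.getD s 0) 0 cand.length
  if 0 < lo then
    (if s ≤ cand.getD (lo - 1) 0 then cand.getD (lo - 1) 0 else s)
  else s

theorem altQuery_ge (A : List Int) (cand : List Nat) (s : Nat) : s ≤ altQuery A cand s := by
  simp only [altQuery]
  split_ifs <;> omega

def altLoop (A : List Int) (cand : List Nat) (cnt : Int) (s : Nat) : Int :=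
  if ((altQuery A cand s + 1 : Nat) : Int) > (A.length : Int) - 1 then cnt + 1
  else if ((altQuery A cand s + 1 : Nat) : Int) = (A.length : Int) - 1 then cnt + 2
  else altLoop A cand (cnt + 1) (altQuery A cand s + 1)
termination_by A.length - s
decreasing_by
  have h1 := altQuery_ge A cand s
  rename_i h2 _
  simp only [not_lt] at h2
  omega

def solution_alt (A : List Int) : Int := altLoop A (altCand A) 0 0

-- ===== PRECONDITION & SPEC =====
def Spec_solution (A : List Int) (out : Int) : Prop := out = solution_alt A
instance (A : List Int) (out : Int) : Decidable (Spec_solution A out) := by unfold Spec_solution; infer_instance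

-- ===== CLAIM (what is proved, stated in full; the proofs are below) =====
def Claim_equal_solution : Prop := ∀ (A : List Int), Dom_solution A → Spec_solution A (solution A)

-- ===== LEMMAS AND PROOFS =====

theorem getD_lt_len {l : List Nat} {k : Nat} (h : k < l.length) : l.getD k 0 = l[k] :=
  List.getD_eq_getElem l 0 h

theorem getD_mem {l : List Nat} {k : Nat} (h : k < l.length) : l.getD k 0 ∈ l := by
  rw [getD_lt_len h]; exact List.getElem_mem h

theorem getD_append_left {xs : List Int} {y : Int} {m : Nat} (h : m < xs.length) :
    (xs ++ [y]).getD m 0 = xs.getD m 0 := by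
  simp [List.getD_eq_getElem?_getD, List.getElem?_append_left h]

theorem getD_concat_self (xs : List Int) (y : Int) : (xs ++ [y]).getD xs.length 0 = y := by
  simp [List.getD_eq_getElem?_getD, List.getElem?_concat_length]

-- characterisation of A's inner fold over an arbitrary list
theorem fold_char (x : Int) (s : Nat) (xs : List Int) :
    ((PySem.List.enumerate xs).foldl (fun e iv => if iv.2 < x then iv.1.toNat + s else e) s = s
        ∧ ∀ m, m < xs.length → ¬ (xs.getD m 0 < x))
    ∨ (∃ m, m < xs.length ∧ xs.getD m 0 < x
        ∧ (PySem.List.enumerate xs).foldl (fun e iv => if iv.2 < x then iv.1.toNat + s else e) s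
            = m + s
        ∧ ∀ m', m < m' → m' < xs.length → ¬ (xs.getD m' 0 < x)) := by
  induction xs using List.reverseRecOn with
  | nil =>
    left
    refine ⟨by simp [PySem.List.enumerate_nil], ?_⟩
    intro m hm; simp at hm
  | append_singleton xs y ih =>
    have hfold : (PySem.List.enumerate (xs ++ [y])).foldl
        (fun e iv => if iv.2 < x then iv.1.toNat + s else e) s
        = (fun e (iv : Int × Int) => if iv.2 < x then iv.1.toNat + s else e)
            ((PySem.List.enumerate xs).foldl
              (fun e iv => if iv.2 < x then iv.1.toNat + s else e) s)
            ((xs.length : Int), y) := by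
      rw [PySem.List.enumerate_append]
      simp [PySem.List.enumerate_cons, PySem.List.enumerate_nil]
    rw [hfold]
    by_cases hy : y < x
    · right
      refine ⟨xs.length, by simp, ?_, ?_, ?_⟩
      · rw [getD_concat_self]; exact hy
      · simp [hy]
      · intro m' h1 h2
        simp only [List.length_append, List.length_cons, List.length_nil] at h2
        omega
    · simp only [hy, if_false]
      rcases ih with ⟨hr, hnone⟩ | ⟨m, hm, hmx, hr, hmax⟩
      · left
        refine ⟨hr, ?_⟩
        intro m hmlen
        simp only [List.length_append, List.length_cons, List.length_nil] at hmlen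
        rcases Nat.lt_or_ge m xs.length with h | h
        · rw [getD_append_left h]; exact hnone m h
        · have : m = xs.length := by omega
          subst this; rw [getD_concat_self]; exact hy
      · right
        refine ⟨m, by simp; omega, by rw [getD_append_left hm]; exact hmx, hr, ?_⟩
        intro m' h1 h2
        simp only [List.length_append, List.length_cons, List.length_nil] at h2
        rcases Nat.lt_or_ge m' xs.length with h | h
        · rw [getD_append_left h]; exact hmax m' h1 h
        · have : m' = xs.length := by omega
          subst this; rw [getD_concat_self]; exact hy

theorem drop_getD (A : List Int) (s m : Nat) :
    (A.drop s).getD m 0 = A.getD (s + m) 0 := by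
  simp [List.getD_eq_getElem?_getD, List.getElem?_drop]

-- A's inner fold returns either s (nothing below A[s] in the suffix) or the LAST index ≥ s
-- whose value is below A[s]
theorem inner_cases (A : List Int) (s : Nat) :
    (solInner A s = s ∧ ∀ j, s ≤ j → j < A.length → ¬ (A.getD j 0 < A.getD s 0))
    ∨ (∃ j, s ≤ j ∧ j < A.length ∧ A.getD j 0 < A.getD s 0 ∧ solInner A s = j ∧
        ∀ k, j < k → k < A.length → ¬ (A.getD k 0 < A.getD s 0)) := by
  have hlen : (A.drop s).length = A.length - s := List.length_drop
  rcases fold_char (A.getD s 0) s (A.drop s) with ⟨hr, hnone⟩ | ⟨m, hm, hmx, hr, hmax⟩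
  · left
    refine ⟨hr, ?_⟩
    intro j hsj hjn
    have := hnone (j - s) (by omega)
    rw [drop_getD, show s + (j - s) = j by omega] at this
    exact this
  · right
    rw [drop_getD] at hmx
    refine ⟨s + m, by omega, by omega, hmx, by unfold solInner; rw [hr]; omega, ?_⟩
    intro k hk1 hk2
    have := hmax (k - s) (by omega) (by omega)
    rw [drop_getD, show s + (k - s) = k by omega] at this
    exact this

-- candidate-stack invariant: after processing range t, st holds exactly the indices j < t whose
-- value is below every later value in [0, t), in decreasing index order
def CandInv (A : List Int) (t : Nat) (st : List Nat) : Prop :=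
  (∀ j, j ∈ st ↔ (j < t ∧ ∀ k, j < k → k < t → A.getD j 0 < A.getD k 0)) ∧
  st.Pairwise (fun a b => b < a)

theorem candInv_valsorted {A : List Int} {t : Nat} {st : List Nat} (h : CandInv A t st) :
    st.Pairwise (fun a b => A.getD b 0 < A.getD a 0) := by
  refine h.2.imp_of_mem ?_
  intro a b ha hb hba
  have hchb := (h.1 b).mp hb
  have hcha := (h.1 a).mp ha
  exact hchb.2 a hba hcha.1

theorem popGE_subset (A : List Int) (x : Int) : ∀ st j, j ∈ popGE A x st → j ∈ st := by
  intro st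
  induction st with
  | nil => intro j h; simpa [popGE] using h
  | cons t rest ih =>
    intro j h
    simp only [popGE] at h
    split at h
    · exact List.mem_cons_of_mem t (ih j h)
    · exact h

theorem popGE_pairwise {A : List Int} {x : Int} {R : Nat → Nat → Prop} :
    ∀ {st : List Nat}, st.Pairwise R → (popGE A x st).Pairwise R := by
  intro st
  induction st with
  | nil => intro _; simp [popGE]
  | cons t rest ih =>
    intro h
    simp only [popGE]
    split
    · exact ih h.of_cons
    · exact h

theorem popGE_mem {A : List Int} {x : Int} :
    ∀ {st : List Nat}, st.Pairwise (fun a b => A.getD b 0 < A.getD a 0) →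
      ∀ j, j ∈ popGE A x st ↔ (j ∈ st ∧ A.getD j 0 < x) := by
  intro st
  induction st with
  | nil => intro _ j; simp [popGE]
  | cons t rest ih =>
    intro hp j
    have hvals := List.pairwise_cons.mp hp
    simp only [popGE]
    split
    · rename_i hx
      rw [ih hvals.2 j]
      constructor
      · rintro ⟨hj, hjx⟩; exact ⟨List.mem_cons_of_mem t hj, hjx⟩
      · rintro ⟨hj, hjx⟩
        rcases List.mem_cons.mp hj with rfl | hj2
        · omega
        · exact ⟨hj2, hjx⟩
    · rename_i hx
      push_neg at hx
      constructor
      · intro hj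
        refine ⟨hj, ?_⟩
        rcases List.mem_cons.mp hj with rfl | hj2
        · exact hx
        · exact lt_trans (hvals.1 j hj2) hx
      · exact fun h => h.1

theorem cand_inv (A : List Int) (t : Nat) :
    CandInv A t ((List.range t).foldl (fun st j => j :: popGE A (A.getD j 0) st) []) := by
  induction t with
  | zero =>
    constructor
    · intro j; simp
    · simp
  | succ t ih =>
    rw [List.range_succ, List.foldl_append, List.foldl_cons, List.foldl_nil]
    set st := (List.range t).foldl (fun st j => j :: popGE A (A.getD j 0) st) [] with hst
    have hvals := candInv_valsorted ih
    have hmemp := popGE_mem (A := A) (x := A.getD t 0) hvals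
    constructor
    · intro j
      rw [List.mem_cons, hmemp j, ih.1 j]
      constructor
      · rintro (rfl | ⟨⟨hjt, hall⟩, hjx⟩)
        · exact ⟨by omega, fun k h1 h2 => by omega⟩
        · refine ⟨by omega, ?_⟩
          intro k h1 h2
          rcases Nat.lt_or_ge k t with h | h
          · exact hall k h1 h
          · have : k = t := by omega
            subst this; exact hjx
      · rintro ⟨hjt, hall⟩
        rcases Nat.lt_or_ge j t with h | h
        · right
          exact ⟨⟨h, fun k h1 h2 => hall k h1 (by omega)⟩, hall t h (by omega)⟩
        · left; omega
    · refine List.pairwise_cons.mpr ⟨?_, popGE_pairwise ih.2⟩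
      intro b hb
      have := (ih.1 b).mp (popGE_subset A _ st b hb)
      omega

theorem cand_mem (A : List Int) (j : Nat) :
    j ∈ altCand A ↔ (j < A.length ∧ ∀ k, j < k → k < A.length → A.getD j 0 < A.getD k 0) := by
  unfold altCand
  rw [List.mem_reverse]
  exact (cand_inv A A.length).1 j

theorem cand_sorted (A : List Int) : (altCand A).Pairwise (fun a b => a < b) := by
  unfold altCand
  rw [List.pairwise_reverse]
  exact (cand_inv A A.length).2

theorem bs_spec (A : List Int) (cand : List Nat) (x : Int)
    (hmono : ∀ k1 k2 : Nat, k1 ≤ k2 → k2 < cand.length →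
      A.getD (cand.getD k2 0) 0 < x → A.getD (cand.getD k1 0) 0 < x) :
    ∀ n lo hi : Nat, hi - lo ≤ n → lo ≤ hi → hi ≤ cand.length →
      (∀ k : Nat, k < cand.length → k < lo → A.getD (cand.getD k 0) 0 < x) →
      (∀ k : Nat, k < cand.length → hi ≤ k → ¬ A.getD (cand.getD k 0) 0 < x) →
      (altBS A cand x lo hi ≤ cand.length ∧
       (∀ k : Nat, k < cand.length → k < altBS A cand x lo hi → A.getD (cand.getD k 0) 0 < x) ∧
       (∀ k : Nat, k < cand.length → altBS A cand x lo hi ≤ k → ¬ A.getD (cand.getD k 0) 0 < x)) := by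
  intro n
  induction n with
  | zero =>
    intro lo hi hfuel hle hhi hpre hpost
    have : lo = hi := by omega
    subst this
    rw [altBS, dif_neg (by omega)]
    exact ⟨hhi, hpre, hpost⟩
  | succ n ih =>
    intro lo hi hfuel hle hhi hpre hpost
    rw [altBS]
    by_cases hlh : lo < hi
    · rw [dif_pos hlh]
      split
      · rename_i hmid
        refine ih ((lo + hi) / 2 + 1) hi (by omega) (by omega) hhi ?_ hpost
        intro k hk hklt
        exact hmono k ((lo + hi) / 2) (by omega) (by omega) hmid
      · rename_i hmid
        refine ih lo ((lo + hi) / 2) (by omega) (by omega) (by omega) hpre ?_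
        intro k hk hge hcon
        exact hmid (hmono ((lo + hi) / 2) k (by omega) hk hcon)
    · rw [dif_neg hlh]
      have : lo = hi := by omega
      subst this
      exact ⟨hhi, hpre, hpost⟩

-- the two per-slice computations agree for every start index
theorem query_eq_inner (A : List Int) (s : Nat) : altQuery A (altCand A) s = solInner A s := by
  have hmem := cand_mem A
  have hsorted := cand_sorted A
  have hidx := List.pairwise_iff_getElem.mp hsorted
  set cL := altCand A with hc
  set x := A.getD s 0 with hx
  have hvals : ∀ k1 k2 : Nat, k1 ≤ k2 → k2 < cL.length →
      A.getD (cL.getD k2 0) 0 < x → A.getD (cL.getD k1 0) 0 < x := by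
    intro k1 k2 hle hlt hpred
    rcases Nat.eq_or_lt_of_le hle with rfl | hlt2
    · exact hpred
    have hk1 : k1 < cL.length := by omega
    have hcc : cL[k1] < cL[k2] := hidx k1 k2 hk1 hlt hlt2
    have hch1 := (hmem (cL[k1])).mp (List.getElem_mem hk1)
    have hch2 := (hmem (cL[k2])).mp (List.getElem_mem hlt)
    have := hch1.2 (cL[k2]) hcc hch2.1
    rw [getD_lt_len hk1]
    rw [getD_lt_len hlt] at hpred
    omega
  obtain ⟨hlen, hall, hnone⟩ := bs_spec A cL x hvals cL.length 0 cL.length (by omega) (by omega)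
    le_rfl (by intro k _ h; omega) (by intro k h1 h2; omega)
  set lo := altBS A cL x 0 cL.length with hlo
  rcases inner_cases A s with ⟨hr, hnoneJ⟩ | ⟨j, hsj, hjn, hjx, hr, hmax⟩
  · rw [hr]
    simp only [altQuery, ← hx, ← hlo]
    split_ifs with h1 h2
    · exfalso
      have hk : lo - 1 < cL.length := by omega
      have hpred := hall (lo - 1) hk (by omega)
      have hchar := (hmem _).mp (getD_mem hk)
      rw [getD_lt_len hk] at hpred h2 hchar
      exact hnoneJ (cL[lo - 1]) h2 hchar.1 hpred
    · rfl
    · rfl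
  · rw [hr]
    have hjc : j ∈ cL := by
      refine (hmem j).mpr ⟨hjn, ?_⟩
      intro k hk1 hk2
      have := hmax k hk1 hk2
      omega
    obtain ⟨p, hp, hpj⟩ := List.getElem_of_mem hjc
    have hpredp : A.getD (cL.getD p 0) 0 < x := by
      rw [getD_lt_len hp, hpj]; exact hjx
    have hplo : p < lo := by
      by_contra h
      push_neg at h
      exact hnone p hp h hpredp
    have h0 : 0 < lo := by omega
    have hk : lo - 1 < cL.length := by omega
    have hpredl := hall (lo - 1) hk (by omega)
    have hclchar := (hmem _).mp (getD_mem hk)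
    have hge : j ≤ cL.getD (lo - 1) 0 := by
      rcases Nat.lt_or_ge p (lo - 1) with h | h
      · have := hidx p (lo - 1) hp hk h
        rw [getD_lt_len hk]
        omega
      · have : p = lo - 1 := by omega
        subst this
        rw [getD_lt_len hp, hpj]
    have hle : cL.getD (lo - 1) 0 ≤ j := by
      by_contra h
      push_neg at h
      exact hmax _ h hclchar.1 hpredl
    simp only [altQuery, ← hx, ← hlo]
    rw [if_pos h0, if_pos (by omega)]
    omega

theorem loop_eq (A : List Int) : ∀ m s cnt, A.length - s ≤ m →
    solLoop A cnt s = altLoop A (altCand A) cnt s := by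
  intro m
  induction m with
  | zero =>
    intro s cnt hm
    rw [solLoop, altLoop, query_eq_inner]
    have hge := solInner_ge A s
    split_ifs with h1 h2
    · rfl
    · rfl
    · exfalso
      simp only [not_lt] at h1
      omega
  | succ m ih =>
    intro s cnt hm
    rw [solLoop, altLoop, query_eq_inner]
    have hge := solInner_ge A s
    split_ifs with h1 h2
    · rfl
    · rfl
    · apply ih
      simp only [not_lt] at h1
      omega

-- ===== VERDICT (by name: the statement is the Claim_ definition above) =====
theorem solution_spec : Claim_equal_solution := by
  intro A _
  unfold Spec_solution solution solution_alt
  exact loop_eq A A.length 0 0 (by omega)
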